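-- pv_equiv track=rewrite | github.com/MykolaBezrukyi/python_dqe | string_object/home_task.py | add_special_sentence
-- ===== SOURCE A (Python) =====
-- PARAGRAPH_NUMBER = 3
--
-- def add_special_sentence(s: str, special_sentence: str) -> str:
--     l = s.split('\n')
--     whitespaces_count = 0
--     for i, sentence in enumerate(l):
--         if sentence in ('', ' '):
--             whitespaces_count += 1
--         if is_paragraph_number(i, whitespaces_count):
--             l[i] = l[i] + ' ' + special_sentence
--             break
--     return '\n'.join(l)
--
-- def is_paragraph_number(i: int, whitespaces_count: int) -> bool:
--     return i - whitespaces_count + 1 == PARAGRAPH_NUMBER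
-- ===== SOURCE B (Python) =====
-- def add_special_sentence(s: str, special_sentence: str) -> str:
--     l = s.split('\n')
--     idx = [i for i, line in enumerate(l) if line not in ('', ' ')]
--     if len(idx) >= 3:
--         l[idx[2]] = l[idx[2]] + ' ' + special_sentence
--     return '\n'.join(l)
-- ===== Notes on version B (the rewrite author's own statement) =====
-- stated objective: simpler
-- what changed: Replaces the running whitespace-counter with break and the is_paragraph_number arithmetic helper by collecting the indices of all non-blank lines up front and directly appending to the third one.
import Mathlib
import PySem

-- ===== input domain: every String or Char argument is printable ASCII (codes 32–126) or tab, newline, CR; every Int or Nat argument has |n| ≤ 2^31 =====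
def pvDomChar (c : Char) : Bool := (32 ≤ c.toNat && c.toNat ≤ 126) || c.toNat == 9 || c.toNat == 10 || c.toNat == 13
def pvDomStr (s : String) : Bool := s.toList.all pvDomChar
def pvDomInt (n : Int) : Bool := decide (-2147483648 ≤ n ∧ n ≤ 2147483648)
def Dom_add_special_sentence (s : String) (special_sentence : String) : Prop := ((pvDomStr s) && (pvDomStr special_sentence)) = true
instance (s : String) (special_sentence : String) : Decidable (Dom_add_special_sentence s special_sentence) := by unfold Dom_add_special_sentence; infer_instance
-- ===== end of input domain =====

-- B replaces A's running whitespace-counter with break (and its arithmetic helper) by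
-- collecting the indices of the non-blank lines up front and appending to the third; same cost, simpler.

-- ===== PORT A =====
def PARAGRAPH_NUMBER : Int := 3

def is_paragraph_number (i : Int) (whitespaces_count : Int) : Bool :=
  i - whitespaces_count + 1 == PARAGRAPH_NUMBER

-- the for-loop of A: index i, running whitespaces_count, break after the first append
def addLoopA (ss : String) : List String → Int → Int → List String
  | [], _, _ => []
  | sentence :: rest, i, wc =>
    let wc' := if sentence == "" || sentence == " " then wc + 1 else wc
    if is_paragraph_number i wc' then (sentence ++ " " ++ ss) :: rest
    else sentence :: addLoopA ss rest (i + 1) wc'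

-- s.split('\n'): split? is none only for sep = "", so .getD [] is exact here
def add_special_sentence (s : String) (special_sentence : String) : String :=
  PySem.Str.join "\n" (addLoopA special_sentence ((PySem.Str.split? s "\n").getD []) 0 0)

-- ===== PORT B =====
def add_special_sentence_alt (s : String) (special_sentence : String) : String :=
  let l := (PySem.Str.split? s "\n").getD []
  let idx := ((PySem.List.enumerate l 0).filter (fun p => !(p.2 == "" || p.2 == " "))).map Prod.fst
  let l' :=
    if 3 ≤ idx.length then
      -- idx[2]: indices come from enumerate(l), hence 0 ≤ idx[2] < len l, so getD/toNat/set are exact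
      let j := (idx.getD 2 0).toNat
      l.set j ((l.getD j "") ++ " " ++ special_sentence)
    else l
  PySem.Str.join "\n" l'

-- ===== PRECONDITION & SPEC =====
def Spec_add_special_sentence (s : String) (special_sentence : String) (out : String) : Prop := out = add_special_sentence_alt s special_sentence
instance (s : String) (special_sentence : String) (out : String) : Decidable (Spec_add_special_sentence s special_sentence out) := by unfold Spec_add_special_sentence; infer_instance

-- ===== CLAIM (what is proved, stated in full; the proofs are below) =====
def Claim_equal_add_special_sentence : Prop := ∀ (s : String) (special_sentence : String), Dom_add_special_sentence s special_sentence → Spec_add_special_sentence s special_sentence (add_special_sentence s special_sentence)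

-- ===== LEMMAS AND PROOFS =====

-- common reference form: append ss to the (n+1)-st non-blank line (counting n down)
def patch (ss : String) : List String → Nat → List String
  | [], _ => []
  | x :: r, n =>
    if x == "" || x == " " then x :: patch ss r n
    else if n = 0 then (x ++ " " ++ ss) :: r else x :: patch ss r (n - 1)

lemma aLoop_eq_patch (ss : String) : ∀ (l : List String) (n : Nat) (i wc : Int),
    i - wc = 2 - (n : Int) → addLoopA ss l i wc = patch ss l n := by
  intro l
  induction l with
  | nil => intro n i wc _; simp [addLoopA, patch]
  | cons x r ih =>
    intro n i wc h
    simp only [addLoopA, patch]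
    by_cases hb : (x == "" || x == " ") = true
    · simp only [hb, if_true]
      have hcond : is_paragraph_number i (wc + 1) = false := by
        simp only [is_paragraph_number, PARAGRAPH_NUMBER, beq_eq_false_iff_ne, ne_eq]
        omega
      simp only [hcond, Bool.false_eq_true, if_false]
      rw [ih n (i + 1) (wc + 1) (by omega)]
    · simp only [hb, if_false, Bool.false_eq_true]
      cases n with
      | zero =>
        have hcond : is_paragraph_number i wc = true := by
          simp only [is_paragraph_number, PARAGRAPH_NUMBER, beq_iff_eq]; omega
        simp [hcond]
      | succ m =>
        have hcond : is_paragraph_number i wc = false := by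
          simp only [is_paragraph_number, PARAGRAPH_NUMBER, beq_eq_false_iff_ne, ne_eq]
          omega
        simp only [hcond, Bool.false_eq_true, if_false, Nat.succ_ne_zero,
          Nat.add_sub_cancel]
        rw [ih m (i + 1) wc (by omega)]

-- indices of the non-blank lines, relative form
def nbIdx : List String → List Int
  | [] => []
  | x :: r => if x == "" || x == " " then (nbIdx r).map (· + 1)
              else 0 :: (nbIdx r).map (· + 1)

lemma nbIdx_nonneg : ∀ (l : List String), ∀ x ∈ nbIdx l, 0 ≤ x := by
  intro l
  induction l with
  | nil => simp [nbIdx]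
  | cons y r ih =>
    intro x hx
    simp only [nbIdx] at hx
    by_cases hb : (y == "" || y == " ") = true
    · simp only [hb, if_true, List.mem_map] at hx
      obtain ⟨a, ha, rfl⟩ := hx
      have := ih a ha; omega
    · simp only [hb, Bool.false_eq_true, if_false, List.mem_cons, List.mem_map] at hx
      rcases hx with rfl | ⟨a, ha, rfl⟩
      · omega
      · have := ih a ha; omega

lemma idx_eq_nbIdx : ∀ (l : List String) (b : Int),
    ((PySem.List.enumerate l b).filter (fun p => !(p.2 == "" || p.2 == " "))).map Prod.fst
      = (nbIdx l).map (· + b) := by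
  intro l
  induction l with
  | nil => intro b; simp [PySem.List.enumerate_nil, nbIdx]
  | cons x r ih =>
    intro b
    simp only [PySem.List.enumerate_cons, nbIdx]
    by_cases hb : (x == "" || x == " ") = true
    · simp only [List.filter_cons, hb, Bool.not_true, if_false, Bool.false_eq_true,
        if_true, ih (b + 1), List.map_map]
      apply List.map_congr_left
      intro a _
      simp [Function.comp]; ring
    · simp only [List.filter_cons, hb, Bool.not_false, Bool.false_eq_true, if_false,
        if_true, List.map_cons, ih (b + 1), List.map_map]
      congr 1
      · simp
      · apply List.map_congr_left
        intro a _
        simp [Function.comp]; ring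

lemma getD_map_add_one (l : List Int) (n : Nat) (hn : n < l.length) :
    (l.map (· + 1)).getD n 0 = l.getD n 0 + 1 := by
  simp [List.getD_eq_getElem?_getD, List.getElem?_map, List.getElem?_eq_getElem hn]

lemma nbIdx_getD_nonneg (l : List String) (n : Nat) : 0 ≤ (nbIdx l).getD n 0 := by
  rcases Nat.lt_or_ge n (nbIdx l).length with h | h
  · rw [List.getD_eq_getElem?_getD, List.getElem?_eq_getElem h]
    exact nbIdx_nonneg l _ (List.getElem_mem h)
  · rw [List.getD_eq_getElem?_getD, List.getElem?_eq_none (by omega)]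
    simp

lemma bcore_eq_patch (ss : String) : ∀ (l : List String) (n : Nat),
    (if n + 1 ≤ (nbIdx l).length then
        l.set ((nbIdx l).getD n 0).toNat ((l.getD ((nbIdx l).getD n 0).toNat "") ++ " " ++ ss)
      else l) = patch ss l n := by
  intro l
  induction l with
  | nil => intro n; simp [nbIdx, patch]
  | cons x r ih =>
    intro n
    simp only [nbIdx, patch]
    by_cases hb : (x == "" || x == " ") = true
    · simp only [hb, if_true]
      by_cases hlen : n + 1 ≤ (nbIdx r).length
      · have hn : n < (nbIdx r).length := hlen
        have hg : ((nbIdx r).map (· + 1)).getD n 0 = (nbIdx r).getD n 0 + 1 :=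
          getD_map_add_one _ _ hn
        have hpos : 0 ≤ (nbIdx r).getD n 0 := nbIdx_getD_nonneg r n
        have htn : (((nbIdx r).getD n 0) + 1).toNat = ((nbIdx r).getD n 0).toNat + 1 := by omega
        rw [if_pos (by simpa using hlen), hg, htn]
        have := ih n
        rw [if_pos hlen] at this
        simp only [List.set_cons_succ, List.getD_cons_succ]
        rw [this]
      · rw [if_neg (by simpa using hlen)]
        have := ih n
        rw [if_neg hlen] at this
        exact congrArg (x :: ·) this
    · simp only [hb, Bool.false_eq_true, if_false]
      cases n with
      | zero =>
        rw [if_pos (by simp)]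
        simp
      | succ m =>
        simp only [List.length_cons, List.getD_cons_succ, Nat.succ_ne_zero, if_false,
          Nat.add_sub_cancel, List.length_map]
        by_cases hlen : m + 1 ≤ (nbIdx r).length
        · have hn : m < (nbIdx r).length := hlen
          have hg : ((nbIdx r).map (· + 1)).getD m 0 = (nbIdx r).getD m 0 + 1 :=
            getD_map_add_one _ _ hn
          have hpos : 0 ≤ (nbIdx r).getD m 0 := nbIdx_getD_nonneg r m
          have htn : (((nbIdx r).getD m 0) + 1).toNat = ((nbIdx r).getD m 0).toNat + 1 := by omega
          rw [if_pos (by omega), hg, htn]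
          have := ih m
          rw [if_pos hlen] at this
          simp only [List.set_cons_succ, List.getD_cons_succ]
          rw [this]
        · rw [if_neg (by omega)]
          have := ih m
          rw [if_neg hlen] at this
          exact congrArg (x :: ·) this

-- ===== VERDICT (by name: the statement is the Claim_ definition above) =====
theorem add_special_sentence_spec : Claim_equal_add_special_sentence := by
  intro s ss _
  unfold Spec_add_special_sentence add_special_sentence add_special_sentence_alt
  congr 1
  rw [aLoop_eq_patch ss _ 2 0 0 (by norm_num)]
  rw [idx_eq_nbIdx]
  have hmap : (nbIdx ((PySem.Str.split? s "\n").getD [])).map (· + (0 : Int)) = nbIdx ((PySem.Str.split? s "\n").getD []) := by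
    simp
  rw [hmap]
  exact (bcore_eq_patch ss ((PySem.Str.split? s "\n").getD []) 2).symm
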